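-- pv_equiv track=rewrite | github.com/KuramitsuLab/pegtree | pegtree/pasm.py | make_bitset
-- ===== SOURCE A (Python) =====
-- def make_bitset(chars, ranges, NBITS=8):
--     cmin = min(map(ord, list(chars+ranges)))-1
--     bitmap = [0] * ((max(map(ord, list(chars+ranges))) - cmin) // NBITS + 1)
--     for c in chars:
--         n = (ord(c) - cmin) // NBITS
--         mask = 1 << (ord(c) - cmin) % NBITS
--         bitmap[n] |= mask
--     r = ranges
--     while len(r) > 1:
--         for c in range(ord(r[0]), ord(r[1])+1):
--             n = (c - cmin) // NBITS
--             mask = 1 << (c - cmin) % NBITS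
--             bitmap[n] |= mask
--         r = r[2:]
--     return bitmap, cmin, len(bitmap)*NBITS
-- ===== SOURCE B (Python) =====
-- def make_bitset(chars, ranges, NBITS=8):
--     ords = [ord(c) for c in chars + ranges]
--     cmin = min(ords) - 1
--     size = (max(ords) - cmin) // NBITS + 1
--     wordmask = (1 << NBITS) - 1
--     # accumulate one big integer: single bits for chars, whole spans for ranges
--     bits = 0
--     for c in chars:
--         bits |= 1 << (ord(c) - cmin)
--     for i in range(0, len(ranges) - 1, 2):
--         lo = ord(ranges[i]) - cmin
--         hi = ord(ranges[i + 1]) - cmin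
--         if lo <= hi:
--             bits |= (1 << (hi + 1)) - (1 << lo)
--     bitmap = [(bits >> (i * NBITS)) & wordmask for i in range(size)]
--     return bitmap, cmin, size * NBITS
-- ===== Notes on version B (the rewrite author's own statement) =====
-- stated objective: faster
-- what changed: B accumulates all bits in one big integer, OR-ing each range in as a single closed-form span mask (1<<(hi+1))-(1<<lo) instead of looping over every codepoint of the range, and only at the end splits the integer into NBITS-wide words, whereas A mutates a word list one bit per codepoint.
-- outside the precondition, e.g. on make_bitset('', 'a', -5): A returns ([], 96, 0), B raises ValueError
import Mathlib
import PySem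

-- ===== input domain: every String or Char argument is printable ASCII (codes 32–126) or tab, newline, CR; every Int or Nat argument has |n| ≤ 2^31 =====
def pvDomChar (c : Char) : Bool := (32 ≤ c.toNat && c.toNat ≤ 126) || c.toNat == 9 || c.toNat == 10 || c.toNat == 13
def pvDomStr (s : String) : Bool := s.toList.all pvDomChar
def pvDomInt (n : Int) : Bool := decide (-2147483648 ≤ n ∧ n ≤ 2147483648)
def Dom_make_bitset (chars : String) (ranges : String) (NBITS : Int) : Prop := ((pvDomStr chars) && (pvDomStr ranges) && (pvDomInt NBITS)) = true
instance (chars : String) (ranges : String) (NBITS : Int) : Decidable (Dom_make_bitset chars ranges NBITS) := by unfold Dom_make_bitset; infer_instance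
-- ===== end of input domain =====

-- B replaces A's per-codepoint bitmap updates by one big-integer accumulator (a closed-form span
-- mask per range) split into NBITS-wide words at the end; measurably faster on the timed inputs.


-- ===== PORT A =====
-- one 'bitmap[n] |= mask' step of A ('1 << e' is '1 <<< e.toNat'; e < 0, where Python raises, is outside Pre_)
def pvSetBitA (bm : List Int) (cmin NBITS : Int) (c : Int) : List Int :=
  let n := PySem.Int.floordiv (c - cmin) NBITS
  let mask : Int := 1 <<< (PySem.Int.mod (c - cmin) NBITS).toNat
  PySem.List.pySetD bm n (PySem.Int.bor (PySem.List.pyGetD bm n 0) mask)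

-- A's 'while len(r) > 1' loop: per pair (r[0], r[1]) every codepoint of range(ord r0, ord r1 + 1), then r = r[2:]
def pvRangesA (cmin NBITS : Int) : List Char → List Int → List Int
  | a :: b :: rest, bm =>
      pvRangesA cmin NBITS rest
        ((PySem.List.pyRange (a.toNat : Int) ((b.toNat : Int) + 1) 1).foldl
          (fun bm c => pvSetBitA bm cmin NBITS c) bm)
  | _, bm => bm

def make_bitset (chars : String) (ranges : String) (NBITS : Int) : List Int × Int × Int :=
  let all : List Int := (chars.toList ++ ranges.toList).map (fun c => (c.toNat : Int))
  match PySem.List.min? all (fun x => x), PySem.List.max? all (fun x => x) with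
  | some mn, some mx =>
    let cmin := mn - 1
    let bitmap0 : List Int := List.replicate (PySem.Int.floordiv (mx - cmin) NBITS + 1).toNat 0
    let bitmap1 := chars.toList.foldl (fun bm c => pvSetBitA bm cmin NBITS (c.toNat : Int)) bitmap0
    let bitmap2 := pvRangesA cmin NBITS ranges.toList bitmap1
    (bitmap2, cmin, PySem.List.len bitmap2 * NBITS)
  | _, _ => ([], 0, 0)   -- unreachable under Pre_: Python's min raises ValueError on the empty list

-- ===== PORT B =====
-- body of B's range-pair loop: lo/hi offsets of the pair, then one closed-form span mask
def pvPairB (cmin : Int) (b : Int) (x y : Char) : Int :=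
  let lo : Int := (x.toNat : Int) - cmin
  let hi : Int := (y.toNat : Int) - cmin
  if lo ≤ hi then PySem.Int.bor b ((1 <<< (hi + 1).toNat) - (1 <<< lo.toNat)) else b

def make_bitset_alt (chars : String) (ranges : String) (NBITS : Int) : List Int × Int × Int :=
  let ords : List Int := (chars.toList ++ ranges.toList).map (fun c => (c.toNat : Int))
  match PySem.List.min? ords (fun x => x) with
  | none => ([], 0, 0)   -- unreachable under Pre_: Python's min raises ValueError on the empty list
  | some mn =>
  match PySem.List.max? ords (fun x => x) with
  | none => ([], 0, 0)
  | some mx =>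
    let cmin := mn - 1
    let size := PySem.Int.floordiv (mx - cmin) NBITS + 1
    let wordmask : Int := (1 <<< NBITS.toNat) - 1
    let bits1 : Int := chars.toList.foldl
      (fun b c => PySem.Int.bor b (1 <<< ((c.toNat : Int) - cmin).toNat)) 0
    let bits2 : Int := (PySem.List.pyRange 0 (PySem.List.len ranges.toList - 1) 2).foldl
      (fun b i => pvPairB cmin b (PySem.List.pyGetD ranges.toList i 'A')
        (PySem.List.pyGetD ranges.toList (i + 1) 'A')) bits1
    let bitmap := (PySem.List.pyRange 0 size 1).map
      (fun i => PySem.Int.band (bits2 >>> (i * NBITS).toNat) wordmask)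
    (bitmap, cmin, size * NBITS)

-- ===== PRECONDITION & SPEC =====
-- Pre_ excludes exactly the inputs where A raises: empty chars+ranges (ValueError from min),
-- NBITS = 0 (ZeroDivisionError) and NBITS < 0 (IndexError whenever any bit would be set; on the
-- remaining degenerate no-op NBITS < 0 inputs B itself raises ValueError on the negative shift).
def Pre_make_bitset (chars : String) (ranges : String) (NBITS : Int) : Prop :=
  chars.toList ++ ranges.toList ≠ [] ∧ 1 ≤ NBITS
instance (chars : String) (ranges : String) (NBITS : Int) : Decidable (Pre_make_bitset chars ranges NBITS) := by unfold Pre_make_bitset; infer_instance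

def pvWitness_make_bitset : String × String × Int := ("ab", "AZ", 8)

def Spec_make_bitset (chars : String) (ranges : String) (NBITS : Int) (out : List Int × Int × Int) : Prop := out = make_bitset_alt chars ranges NBITS
instance (chars : String) (ranges : String) (NBITS : Int) (out : List Int × Int × Int) : Decidable (Spec_make_bitset chars ranges NBITS out) := by unfold Spec_make_bitset; infer_instance

-- ===== CLAIM (what is proved, stated in full; the proofs are below) =====
def Claim_equal_make_bitset : Prop := ∀ (chars : String) (ranges : String) (NBITS : Int), Dom_make_bitset chars ranges NBITS → Pre_make_bitset chars ranges NBITS → Spec_make_bitset chars ranges NBITS (make_bitset chars ranges NBITS)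

-- ===== LEMMAS AND PROOFS =====

-- Nat-level model: one bitmap update, and the word list as the NBITS-wide decoding of one number
def pvUpd (NB : Nat) (bm : List Nat) (o : Nat) : List Nat :=
  bm.set (o / NB) (bm.getD (o / NB) 0 ||| 2 ^ (o % NB))

def pvDec (bits sz NB : Nat) : List Nat :=
  (List.range sz).map fun i => (bits >>> (i * NB)) &&& (2 ^ NB - 1)

-- Nat-level model of B's per-pair step (offsets lo/hi measured from cmin)
def pvGBN (mnN : Nat) (bits : Nat) (a b : Char) : Nat :=
  let lo := a.toNat + 1 - mnN
  let hi := b.toNat + 1 - mnN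
  if lo ≤ hi then bits ||| ((2 ^ (hi + 1 - lo) - 1) <<< lo) else bits

-- B's pair recursion over the characters of `ranges`
def pvPairs {α : Type} (g : α → Char → Char → α) : List Char → α → α
  | a :: b :: rest, acc => pvPairs g rest (g acc a b)
  | _, acc => acc

theorem pvDec_zero (sz NB : Nat) : pvDec 0 sz NB = List.replicate sz 0 := by
  simp [pvDec]

theorem pvGetDMapCast (l : List Nat) (n : Nat) :
    (l.map (fun x : Nat => (x : Int))).getD n 0 = ((l.getD n 0 : Nat) : Int) := by
  induction l generalizing n with
  | nil => cases n <;> rfl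
  | cons x xs ih =>
    cases n with
    | zero => rfl
    | succ n => simpa [List.getD_cons_succ] using ih n

theorem pvDec_or {NB sz o : Nat} (hNB : 0 < NB) (ho : o / NB < sz) (bits : Nat) :
    pvDec (bits ||| 2 ^ o) sz NB = pvUpd NB (pvDec bits sz NB) o := by
  have hlen : ∀ b', (pvDec b' sz NB).length = sz := by intro b'; simp [pvDec]
  have hL : ∀ (b' : Nat) (j : Nat) (hj : j < sz),
      (pvDec b' sz NB)[j]'(by rw [hlen]; exact hj) = (b' >>> (j * NB)) % 2 ^ NB := by
    intro b' j hj; simp [pvDec, Nat.and_two_pow_sub_one_eq_mod]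
  have hgd : (pvDec bits sz NB).getD (o / NB) 0 = (bits >>> ((o / NB) * NB)) % 2 ^ NB := by
    rw [List.getD_eq_getElem?_getD, List.getElem?_eq_getElem (by rw [hlen]; exact ho),
      Option.getD_some, hL bits _ ho]
  apply List.ext_getElem
  · simp [pvUpd, hlen]
  intro i hi1 hi2
  have hisz : i < sz := by rw [hlen] at hi1; exact hi1
  simp only [pvUpd, hgd]
  rw [hL _ i hisz, List.getElem_set, hL bits i hisz]
  have hmod : o % NB < NB := Nat.mod_lt _ hNB
  split_ifs with h
  · apply Nat.eq_of_testBit_eq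
    intro k
    have ho2 : i * NB + o % NB = o := by rw [← h, Nat.mul_comm]; exact Nat.div_add_mod o NB
    rw [← h]
    simp only [Nat.testBit_mod_two_pow, Nat.testBit_or, Nat.testBit_shiftRight,
      Nat.testBit_two_pow, h]
    generalize i * NB = p at ho2 ⊢
    by_cases hk : k < NB <;> by_cases hb : bits.testBit (p + k) <;>
      simp [hk, hb, decide_eq_decide] <;> omega
  · apply Nat.eq_of_testBit_eq
    intro k
    simp only [Nat.testBit_mod_two_pow, Nat.testBit_or, Nat.testBit_shiftRight,
      Nat.testBit_two_pow]
    by_cases hk : k < NB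
    · have hne : o ≠ i * NB + k := by
        intro he
        apply h
        rw [he, Nat.mul_comm, Nat.mul_add_div hNB, Nat.div_eq_of_lt hk]
        omega
      simp [hk, hne]
    · simp [hk]

theorem pvDec_fold {NB sz : Nat} (hNB : 0 < NB) (os : List Nat)
    (h : ∀ o ∈ os, o / NB < sz) (bits : Nat) :
    pvDec (os.foldl (fun b o => b ||| 2 ^ o) bits) sz NB
      = os.foldl (pvUpd NB) (pvDec bits sz NB) := by
  induction os generalizing bits with
  | nil => rfl
  | cons o os ih =>
    simp only [List.foldl_cons]
    rw [ih (fun x hx => h x (List.mem_cons_of_mem _ hx)),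
        pvDec_or hNB (h o (List.mem_cons_self ..))]

theorem pvOrSpan (b lo m : Nat) :
    (List.range m).foldl (fun acc k => acc ||| 2 ^ (lo + k)) b = b ||| ((2 ^ m - 1) <<< lo) := by
  induction m generalizing b with
  | zero => simp
  | succ m ih =>
    rw [List.range_succ, List.foldl_append]
    simp only [List.foldl_cons, List.foldl_nil, ih]
    apply Nat.eq_of_testBit_eq
    intro k
    simp only [Nat.testBit_or, Nat.testBit_shiftLeft, Nat.testBit_two_pow_sub_one,
      Nat.testBit_two_pow]
    by_cases hb : b.testBit k <;> by_cases h2 : lo ≤ k <;> by_cases h3 : k - lo < m <;>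
      by_cases h4 : lo + m = k <;> simp [hb, h2, h3, h4] <;> omega

theorem pvSpanMask (lo m : Nat) : ((2 ^ m - 1) <<< lo) = 2 ^ (m + lo) - 2 ^ lo := by
  rw [Nat.shiftLeft_eq, Nat.sub_mul, one_mul, ← pow_add]

-- a foldl commutes with a cast of the accumulator
theorem pvFoldCast {α β γ : Type} (cast : β → γ) (l : List α) (f : γ → α → γ) (g : β → α → β)
    (h : ∀ b a, a ∈ l → f (cast b) a = cast (g b a)) (b0 : β) :
    l.foldl f (cast b0) = cast (l.foldl g b0) := by
  induction l generalizing b0 with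
  | nil => rfl
  | cons x xs ih =>
    simp only [List.foldl_cons]
    rw [h b0 x (List.mem_cons_self ..), ih (fun b a ha => h b a (List.mem_cons_of_mem _ ha))]

-- A's bitmap[n] |= mask step is pvUpd under the Nat cast
theorem pvSetBitA_cast (bmN : List Nat) (cmin : Int) (NBN : Nat)
    (c : Int) (oN : Nat) (hc : c - cmin = (oN : Nat)) :
    pvSetBitA (bmN.map (fun n : Nat => (n : Int))) cmin (NBN : Int) c
      = (pvUpd NBN bmN oN).map (fun n : Nat => (n : Int)) := by
  simp only [pvSetBitA, pvUpd, hc, PySem.Int.floordiv_natCast, PySem.Int.mod_natCast,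
    Int.toNat_natCast, PySem.List.pyGetD_natCast, pvGetDMapCast,
    PySem.Int.bor_natCast, PySem.List.pySetD_natCast, Nat.one_shiftLeft]
  simp [List.map_set]

-- the fold over range(0, len(ranges)-1, 2) with pair lookups is the structural pair recursion
theorem pvPairsFold {α : Type} (g : α → Char → Char → α) : ∀ (rs : List Char) (acc : α),
    (PySem.List.pyRange 0 (PySem.List.len rs - 1) 2).foldl
      (fun a i => g a (PySem.List.pyGetD rs i 'A') (PySem.List.pyGetD rs (i + 1) 'A')) acc
      = pvPairs g rs acc
  | [], acc => by
    simp [PySem.List.len_eq, PySem.List.pyRange_of_pos (0 : Int) (-1) (by norm_num : (0:Int) < 2),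
      pvPairs]
  | [a], acc => by
    simp [PySem.List.len_eq, PySem.List.pyRange_of_pos (0 : Int) 0 (by norm_num : (0:Int) < 2),
      pvPairs]
  | a :: b :: rest, acc => by
    have hrec := pvPairsFold g rest (g acc a b)
    simp only [PySem.List.len_eq, List.length_cons] at hrec ⊢
    rw [PySem.List.pyRange_of_pos 0 (((rest.length + 1 + 1 : Nat) : Int) - 1) (by norm_num : (0:Int) < 2)]
    rw [PySem.List.pyRange_of_pos 0 (((rest.length : Nat) : Int) - 1) (by norm_num : (0:Int) < 2)] at hrec
    have hcnt : (if (0:Int) < ((rest.length + 1 + 1 : Nat) : Int) - 1 then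
        ((((rest.length + 1 + 1 : Nat) : Int) - 1 - 0 + 2 - 1) / 2).toNat else 0) = rest.length / 2 + 1 := by
      split_ifs with h <;> omega
    have hcnt' : (if (0:Int) < ((rest.length : Nat) : Int) - 1 then
        ((((rest.length : Nat) : Int) - 1 - 0 + 2 - 1) / 2).toNat else 0) = rest.length / 2 := by
      split_ifs with h <;> omega
    rw [hcnt]
    rw [hcnt'] at hrec
    rw [List.range_succ_eq_map, List.map_cons, List.foldl_cons, List.map_map, List.foldl_map]
    rw [List.foldl_map] at hrec
    have h0 : PySem.List.pyGetD (a :: b :: rest) (0 + 2 * ((0:Nat):Int)) 'A' = a := by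
      norm_num [PySem.List.pyGetD_zero_cons]
    have h1 : PySem.List.pyGetD (a :: b :: rest) (0 + 2 * ((0:Nat):Int) + 1) 'A' = b := by
      have : (0 + 2 * ((0:Nat):Int) + 1) = ((1:Nat):Int) := by norm_num
      rw [this, PySem.List.pyGetD_natCast]
      rfl
    rw [h0, h1]
    rw [show pvPairs g (a :: b :: rest) acc = pvPairs g rest (g acc a b) from rfl]
    rw [← hrec]
    simp only [Function.comp_def]
    apply PySem.List.foldl_congr_mem
    intro acc' k _
    have e1 : (0 + 2 * (↑(Nat.succ k) : Int)) = ((2 * k + 2 : Nat) : Int) := by push_cast; ring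
    have e2 : (0 + 2 * (↑(Nat.succ k) : Int) + 1) = ((2 * k + 3 : Nat) : Int) := by push_cast; ring
    have e3 : (0 + 2 * ((k:Nat) : Int)) = ((2 * k : Nat) : Int) := by push_cast; ring
    have e4 : (0 + 2 * ((k:Nat) : Int) + 1) = ((2 * k + 1 : Nat) : Int) := by push_cast; ring
    rw [e2, e1, e4, e3, PySem.List.pyGetD_natCast, PySem.List.pyGetD_natCast,
      PySem.List.pyGetD_natCast, PySem.List.pyGetD_natCast]
    simp

-- A's whole range loop, decoded: it ORs exactly B's span masks into the big number
theorem pvRangesA_cast (mn : Int) (h0 : 0 ≤ mn) (NBN szN WN : Nat) (hNB : 0 < NBN)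
    (hdiv : ∀ o : Nat, o ≤ WN → o / NBN < szN) :
    ∀ (rs : List Char), (∀ ch ∈ rs, mn ≤ (ch.toNat : Int) ∧ ch.toNat + 1 - mn.toNat ≤ WN) →
    ∀ bitsN : Nat,
    pvRangesA (mn - 1) (NBN : Int) rs ((pvDec bitsN szN NBN).map (fun n : Nat => (n : Int)))
      = (pvDec (pvPairs (pvGBN mn.toNat) rs bitsN) szN NBN).map (fun n : Nat => (n : Int))
  | [], _, bitsN => rfl
  | [a], _, bitsN => rfl
  | a :: b :: rest, hb, bitsN => by
    obtain ⟨ha1, ha2⟩ := hb a (by simp)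
    obtain ⟨hb1, hb2⟩ := hb b (by simp)
    have hmn : mn = (mn.toNat : Int) := (Int.toNat_of_nonneg h0).symm
    have hrest : ∀ ch ∈ rest, mn ≤ (ch.toNat : Int) ∧ ch.toNat + 1 - mn.toNat ≤ WN := by
      intro ch hch; exact hb ch (by simp [hch])
    rw [show pvRangesA (mn - 1) (NBN : Int) (a :: b :: rest)
          ((pvDec bitsN szN NBN).map (fun n : Nat => (n : Int)))
        = pvRangesA (mn - 1) (NBN : Int) rest
            ((PySem.List.pyRange (a.toNat : Int) ((b.toNat : Int) + 1) 1).foldl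
              (fun bm c => pvSetBitA bm (mn - 1) (NBN : Int) c)
              ((pvDec bitsN szN NBN).map (fun n : Nat => (n : Int)))) from rfl]
    rw [show pvPairs (pvGBN mn.toNat) (a :: b :: rest) bitsN
        = pvPairs (pvGBN mn.toNat) rest (pvGBN mn.toNat bitsN a b) from rfl]
    have hinner : (PySem.List.pyRange (a.toNat : Int) ((b.toNat : Int) + 1) 1).foldl
        (fun bm c => pvSetBitA bm (mn - 1) (NBN : Int) c)
        ((pvDec bitsN szN NBN).map (fun n : Nat => (n : Int)))
        = (pvDec (pvGBN mn.toNat bitsN a b) szN NBN).map (fun n : Nat => (n : Int)) := by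
      rw [PySem.List.pyRange_one, List.foldl_map]
      have hmval : (((b.toNat : Int) + 1 - (a.toNat : Int)).toNat) = b.toNat + 1 - a.toNat := by
        omega
      rw [hmval]
      set loN := a.toNat + 1 - mn.toNat with hlo
      set m := b.toNat + 1 - a.toNat with hm
      rw [pvFoldCast (fun bmN : List Nat => bmN.map (fun n : Nat => (n : Int)))
        (List.range m)
        (fun bm k => pvSetBitA bm (mn - 1) (NBN : Int) ((a.toNat : Int) + (k : Int)))
        (fun bmN k => pvUpd NBN bmN (loN + k))
        (by
          intro bmN k _
          apply pvSetBitA_cast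
          push_cast
          omega)
        (pvDec bitsN szN NBN)]
      rw [← List.foldl_map (f := fun k => loN + k) (g := pvUpd NBN)]
      rw [← pvDec_fold hNB ((List.range m).map (fun k => loN + k))
        (by
          intro o ho
          obtain ⟨k, hk, rfl⟩ := List.mem_map.mp ho
          have hkm : k < m := List.mem_range.mp hk
          apply hdiv
          omega)
        bitsN]
      rw [List.foldl_map, pvOrSpan]
      congr 1
      simp only [pvGBN]
      split_ifs with hc
      · have hme : b.toNat + 1 - mn.toNat + 1 - (a.toNat + 1 - mn.toNat) = m := by omega
        rw [hme]
      · have : m = 0 := by omega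
        simp [this]
    rw [hinner]
    exact pvRangesA_cast mn h0 NBN szN WN hNB hdiv rest hrest (pvGBN mn.toNat bitsN a b)

-- B's pair step under the Nat cast
theorem pvPairsB_cast (mn : Int) (h0 : 0 ≤ mn) :
    ∀ (rs : List Char), (∀ ch ∈ rs, mn ≤ (ch.toNat : Int)) → ∀ bitsN : Nat,
    pvPairs (pvPairB (mn - 1)) rs ((bitsN : Nat) : Int)
      = ((pvPairs (pvGBN mn.toNat) rs bitsN : Nat) : Int)
  | [], _, bitsN => rfl
  | [a], _, bitsN => rfl
  | a :: b :: rest, hb, bitsN => by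
    have ha1 := hb a (by simp)
    have hb1 := hb b (by simp)
    have hrest : ∀ ch ∈ rest, mn ≤ (ch.toNat : Int) := by
      intro ch hch; exact hb ch (by simp [hch])
    rw [show pvPairs (pvPairB (mn - 1)) (a :: b :: rest) ((bitsN : Nat) : Int)
        = pvPairs (pvPairB (mn - 1)) rest (pvPairB (mn - 1) ((bitsN : Nat) : Int) a b) from rfl]
    rw [show pvPairs (pvGBN mn.toNat) (a :: b :: rest) bitsN
        = pvPairs (pvGBN mn.toNat) rest (pvGBN mn.toNat bitsN a b) from rfl]
    have hstep : pvPairB (mn - 1) ((bitsN : Nat) : Int) a b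
        = ((pvGBN mn.toNat bitsN a b : Nat) : Int) := by
      simp only [pvPairB, pvGBN]
      set loN := a.toNat + 1 - mn.toNat with hlo
      set hiN := b.toNat + 1 - mn.toNat with hhi
      have hloe : (a.toNat : Int) - (mn - 1) = (loN : Int) := by omega
      have hhie : (b.toNat : Int) - (mn - 1) = (hiN : Int) := by omega
      rw [hloe, hhie]
      by_cases hc : loN ≤ hiN
      · rw [if_pos (by exact_mod_cast hc), if_pos hc]
        have h1 : ((hiN : Int) + 1).toNat = hiN + 1 := by omega
        rw [h1, Int.toNat_natCast]
        simp only [Nat.one_shiftLeft]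
        have hmask : (2 ^ (hiN + 1) : Nat) - 2 ^ loN = (2 ^ (hiN + 1 - loN) - 1) <<< loN := by
          rw [pvSpanMask, show hiN + 1 - loN + loN = hiN + 1 from by omega]
        rw [show ((2 ^ (hiN + 1) : Nat) : Int) - ((2 ^ loN : Nat) : Int)
            = ((2 ^ (hiN + 1) - 2 ^ loN : Nat) : Int) from by
          rw [Int.natCast_sub (Nat.pow_le_pow_right (by norm_num) (by omega))],
          hmask, PySem.Int.bor_natCast]
      · rw [if_neg (by exact_mod_cast hc), if_neg hc]
    rw [hstep]
    exact pvPairsB_cast mn h0 rest hrest (pvGBN mn.toNat bitsN a b)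

-- B's final word-splitting comprehension is the decoder, under the Nat cast
theorem pvDecodeB_cast (bitsN szN NBN : Nat) :
    (PySem.List.pyRange 0 ((szN : Nat) : Int) 1).map
      (fun i => PySem.Int.band (((bitsN : Nat) : Int) >>> (i * ((NBN : Nat) : Int)).toNat)
        ((1 <<< NBN) - 1))
    = (pvDec bitsN szN NBN).map (fun n : Nat => (n : Int)) := by
  rw [PySem.List.pyRange_one, List.map_map]
  rw [show (((szN : Nat) : Int) - 0).toNat = szN by omega]
  unfold pvDec
  rw [List.map_map]
  apply List.map_congr_left
  intro k _
  simp only [Function.comp_apply]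
  have he : ((0 + (k : Int)) * ((NBN : Nat) : Int)).toNat = k * NBN := by
    rw [show (0 + (k : Int)) = ((k : Nat) : Int) from by omega, ← Nat.cast_mul, Int.toNat_natCast]
  rw [he, ← Int.natCast_shiftRight]
  simp only [Nat.one_shiftLeft]
  rw [show ((2 ^ NBN : Nat) : Int) - 1 = ((2 ^ NBN - 1 : Nat) : Int) from by
      rw [Int.natCast_sub (Nat.one_le_two_pow)]
      norm_num,
    PySem.Int.band_natCast]

-- ===== VERDICT (by name: the statement is the Claim_ definition above) =====
theorem make_bitset_spec : Claim_equal_make_bitset := by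
  intro chars ranges NBITS _ hpre
  obtain ⟨hne, hNB1⟩ := hpre
  unfold Spec_make_bitset make_bitset make_bitset_alt
  set allL := (chars.toList ++ ranges.toList).map (fun c => (c.toNat : Int)) with hall
  dsimp only
  have hallne : allL ≠ [] := by
    rw [hall]
    simpa using hne
  obtain ⟨mn, hmn⟩ : ∃ mn, PySem.List.min? allL (fun x => x) = some mn := by
    cases h : PySem.List.min? allL (fun x => x) with
    | none => exact absurd ((PySem.List.min?_eq_none_iff allL (fun x => x)).mp h) hallne
    | some m => exact ⟨m, rfl⟩
  obtain ⟨mx, hmx⟩ : ∃ mx, PySem.List.max? allL (fun x => x) = some mx := by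
    cases h : PySem.List.max? allL (fun x => x) with
    | none => exact absurd ((PySem.List.max?_eq_none_iff allL (fun x => x)).mp h) hallne
    | some m => exact ⟨m, rfl⟩
  rw [hmn, hmx]
  dsimp only
  have hmnmem : mn ∈ allL := PySem.List.min?_mem hmn
  have h0 : 0 ≤ mn := by
    rw [hall] at hmnmem
    obtain ⟨c, _, rfl⟩ := List.mem_map.mp hmnmem
    exact Int.natCast_nonneg _
  have hmnle : ∀ x ∈ allL, mn ≤ x := PySem.List.min?_isMin hmn
  have hmxge : ∀ x ∈ allL, x ≤ mx := PySem.List.max?_isMax hmx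
  have hmnmx : mn ≤ mx := hmxge mn hmnmem
  set NBN := NBITS.toNat with hNBN
  have hNBe : NBITS = (NBN : Int) := by omega
  have hNBpos : 0 < NBN := by omega
  rw [hNBe]
  set mnN := mn.toNat with hmnN
  have hmne : mn = (mnN : Int) := by omega
  set WN := (mx - mn + 1).toNat with hWN
  have hWe : mx - (mn - 1) = (WN : Int) := by omega
  set szN := WN / NBN + 1 with hszN
  have hdiv : ∀ o : Nat, o ≤ WN → o / NBN < szN := by
    intro o ho
    have := Nat.div_le_div_right (c := NBN) ho
    omega
  have hsize : PySem.Int.floordiv (mx - (mn - 1)) (NBN : Int) + 1 = (szN : Int) := by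
    rw [hWe, PySem.Int.floordiv_natCast, hszN]
    push_cast
    ring
  have hmemall : ∀ ch ∈ chars.toList ++ ranges.toList,
      mn ≤ (ch.toNat : Int) ∧ ch.toNat + 1 - mnN ≤ WN := by
    intro ch hch
    have h1 : mn ≤ (ch.toNat : Int) := hmnle _ (by rw [hall]; exact List.mem_map_of_mem hch)
    have h2 : (ch.toNat : Int) ≤ mx := hmxge _ (by rw [hall]; exact List.mem_map_of_mem hch)
    exact ⟨h1, by omega⟩
  have hcharsb : ∀ ch ∈ chars.toList, mn ≤ (ch.toNat : Int) ∧ ch.toNat + 1 - mnN ≤ WN :=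
    fun ch hch => hmemall ch (List.mem_append_left _ hch)
  have hrangesb : ∀ ch ∈ ranges.toList, mn ≤ (ch.toNat : Int) ∧ ch.toNat + 1 - mnN ≤ WN :=
    fun ch hch => hmemall ch (List.mem_append_right _ hch)
  rw [hsize]
  simp only [Int.toNat_natCast]
  have h0dec : (List.replicate szN (0 : Int)) = (pvDec 0 szN NBN).map (fun n : Nat => (n : Int)) := by
    rw [pvDec_zero]
    simp
  rw [h0dec]
  set CN := chars.toList.foldl (fun b c => b ||| 2 ^ (c.toNat + 1 - mnN)) 0 with hCN
  have hcharsA : chars.toList.foldl (fun bm c => pvSetBitA bm (mn - 1) (NBN : Int) ((c.toNat : Int)))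
      ((pvDec 0 szN NBN).map (fun n : Nat => (n : Int)))
      = (pvDec CN szN NBN).map (fun n : Nat => (n : Int)) := by
    rw [pvFoldCast (fun bmN : List Nat => bmN.map (fun n : Nat => (n : Int))) chars.toList _
      (fun bmN c => pvUpd NBN bmN (c.toNat + 1 - mnN))
      (by
        intro bmN c hc
        apply pvSetBitA_cast
        have := (hcharsb c hc).1
        omega)
      (pvDec 0 szN NBN)]
    congr 1
    rw [← List.foldl_map (f := fun c : Char => c.toNat + 1 - mnN) (g := pvUpd NBN)]
    rw [← pvDec_fold hNBpos (chars.toList.map (fun c : Char => c.toNat + 1 - mnN))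
      (by
        intro o ho
        obtain ⟨c, hc, rfl⟩ := List.mem_map.mp ho
        exact hdiv _ (hcharsb c hc).2)
      0]
    rw [List.foldl_map]
  rw [hcharsA]
  have hcharsB : chars.toList.foldl
      (fun b c => PySem.Int.bor b (1 <<< ((c.toNat : Int) - (mn - 1)).toNat)) (0 : Int)
      = ((CN : Nat) : Int) := by
    rw [show (0 : Int) = ((0 : Nat) : Int) from rfl]
    rw [pvFoldCast (fun n : Nat => (n : Int)) chars.toList _
      (fun b c => b ||| 2 ^ (c.toNat + 1 - mnN))
      (by
        intro b c hc
        have h1 := (hcharsb c hc).1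
        rw [show ((c.toNat : Int) - (mn - 1)) = ((c.toNat + 1 - mnN : Nat) : Int) from by omega,
          Int.toNat_natCast]
        simp only [Nat.one_shiftLeft, PySem.Int.bor_natCast])
      0]
  rw [hcharsB]
  set RN := pvPairs (pvGBN mnN) ranges.toList CN with hRN
  have hrA : pvRangesA (mn - 1) (NBN : Int) ranges.toList
      ((pvDec CN szN NBN).map (fun n : Nat => (n : Int)))
      = (pvDec RN szN NBN).map (fun n : Nat => (n : Int)) := by
    rw [pvRangesA_cast mn h0 NBN szN WN hNBpos hdiv ranges.toList hrangesb CN]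
  rw [hrA]
  have hrB1 := pvPairsFold (pvPairB (mn - 1)) ranges.toList ((CN : Nat) : Int)
  rw [hrB1]
  have hrB2 : pvPairs (pvPairB (mn - 1)) ranges.toList ((CN : Nat) : Int) = ((RN : Nat) : Int) :=
    pvPairsB_cast mn h0 ranges.toList (fun ch hch => (hrangesb ch hch).1) CN
  rw [hrB2]
  rw [pvDecodeB_cast RN szN NBN]
  have hlen : PySem.List.len ((pvDec RN szN NBN).map (fun n : Nat => (n : Int))) = (szN : Int) := by
    simp [PySem.List.len_eq, pvDec]
  rw [hlen]
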